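-- pv_equiv track=rewrite | github.com/KevinPham-BME-Prog/CCPS109-lab-upload | labs109(1).py | pancake_scramble
-- ===== SOURCE A (Python) =====
-- def pancake_scramble(text):
--   x = 2
--   result = text[0:2]
--   result = result[::-1]
--   while x <= (len(text)-1):
--     result += text[x]
--     result = result[::-1]
--     x += 1
--   return (result)
-- ===== SOURCE B (Python) =====
-- def pancake_scramble(text):
--     # O(n): emit chars at indices n-1, n-3, ... then n%2, n%2+2, ... directly
--     n = len(text)
--     out = []
--     i = n - 1
--     while i >= 0:
--         out.append(text[i])
--         i -= 2
--     i = n % 2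
--     while i < n:
--         out.append(text[i])
--         i += 2
--     return ''.join(out)
-- ===== Notes on version B (the rewrite author's own statement) =====
-- stated objective: faster
-- what changed: replaces the repeated append-and-reverse loop (quadratic copying) by emitting the final deterministic permutation directly: indices n-1,n-3,... descending, then n%2,n%2+2,... ascending, in one linear pass
import Mathlib
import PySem

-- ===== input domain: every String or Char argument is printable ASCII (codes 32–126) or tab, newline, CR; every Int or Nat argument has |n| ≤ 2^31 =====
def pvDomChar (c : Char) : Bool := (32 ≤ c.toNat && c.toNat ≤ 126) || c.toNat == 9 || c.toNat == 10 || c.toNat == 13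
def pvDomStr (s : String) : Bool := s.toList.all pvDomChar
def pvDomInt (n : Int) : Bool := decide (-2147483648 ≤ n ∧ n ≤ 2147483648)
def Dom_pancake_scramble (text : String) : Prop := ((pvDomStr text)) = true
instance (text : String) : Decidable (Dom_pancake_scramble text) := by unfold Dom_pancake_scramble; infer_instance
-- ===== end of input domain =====

-- B replaces A's append-and-reverse loop by directly emitting the final permutation
-- (indices n-1,n-3,... descending, then n%2,n%2+2,... ascending) in one pass.


-- ===== PORT A =====
-- while x <= len(text)-1: result += text[x]; result = result[::-1]; x += 1
-- (text[x] is always in range inside the loop, so the pyGet? default is never used)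
def pvLoopA (chars : List Char) (x : Nat) (result : List Char) : List Char :=
  if _h : (x : Int) ≤ (chars.length : Int) - 1 then
    pvLoopA chars (x + 1) ((result ++ [(PySem.List.pyGet? chars (x : Int)).getD ' ']).reverse)
  else result
termination_by chars.length - x
decreasing_by omega

def pancake_scramble (text : String) : String :=
  -- result = text[0:2]; result = result[::-1]
  String.ofList (pvLoopA text.toList 2 ((PySem.List.slice text.toList (some 0) (some 2)).reverse))

-- ===== PORT B =====
-- while i >= 0: out.append(text[i]); i -= 2   (text[i] always in range: 0 ≤ i ≤ n-1)
def pvDesc (chars : List Char) (i : Int) : List Char :=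
  if _h : 0 ≤ i then
    (PySem.List.pyGet? chars i).getD ' ' :: pvDesc chars (i - 2)
  else []
termination_by (i + 1).toNat
decreasing_by omega

-- while i < n: out.append(text[i]); i += 2   (text[i] always in range: 0 ≤ i < n)
def pvAsc (chars : List Char) (i : Int) : List Char :=
  if _h : i < (chars.length : Int) then
    (PySem.List.pyGet? chars i).getD ' ' :: pvAsc chars (i + 2)
  else []
termination_by ((chars.length : Int) - i).toNat
decreasing_by omega

def pancake_scramble_alt (text : String) : String :=
  String.ofList (pvDesc text.toList ((text.toList.length : Int) - 1) ++
                 pvAsc text.toList (PySem.Int.mod (text.toList.length : Int) 2))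

-- ===== PRECONDITION & SPEC =====
def Spec_pancake_scramble (text : String) (out : String) : Prop := out = pancake_scramble_alt text
instance (text : String) (out : String) : Decidable (Spec_pancake_scramble text out) := by unfold Spec_pancake_scramble; infer_instance

-- ===== CLAIM (what is proved, stated in full; the proofs are below) =====
def Claim_equal_pancake_scramble : Prop := ∀ (text : String), Dom_pancake_scramble text → Spec_pancake_scramble text (pancake_scramble text)

-- ===== LEMMAS AND PROOFS =====

-- characters at even indices
def pvEvens {α : Type} : List α → List α
  | [] => []
  | [a] => [a]
  | a :: _ :: t => a :: pvEvens t

-- the closed form both programs compute: one parity descending, the other ascending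
def pvG (l : List Char) : List Char :=
  pvEvens l.reverse ++ pvEvens (l.drop (l.length % 2))

lemma pvEvens_cons {α : Type} (a : α) (t : List α) :
    pvEvens (a :: t) = a :: pvEvens t.tail := by
  cases t <;> simp [pvEvens]

lemma pvEvens_append_singleton {α : Type} (l : List α) (c : α) :
    pvEvens (l ++ [c]) = if l.length % 2 = 0 then pvEvens l ++ [c] else pvEvens l := by
  induction l using pvEvens.induct with
  | case1 => simp [pvEvens]
  | case2 a => simp [pvEvens]
  | case3 a b t ih =>
      have hm : (t.length + 1 + 1) % 2 = t.length % 2 := by omega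
      by_cases h : t.length % 2 = 0 <;> simp [pvEvens, ih, h, hm]

lemma pvEvens_reverse {α : Type} (l : List α) :
    pvEvens l.reverse =
      if l.length % 2 = 0 then (pvEvens l.tail).reverse else (pvEvens l).reverse := by
  induction l with
  | nil => simp [pvEvens]
  | cons a t ih =>
      rw [List.reverse_cons, pvEvens_append_singleton]
      simp only [List.length_reverse, List.length_cons, List.tail_cons]
      by_cases h : t.length % 2 = 0
      · rw [if_pos h, if_neg (by omega), ih, if_pos h, pvEvens_cons]
        simp
      · rw [if_neg h, if_pos (by omega), ih, if_neg h]

-- the pancake step: appending one char then reversing, on the closed form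
lemma pvG_step (l : List Char) (c : Char) :
    pvG (l ++ [c]) = (pvG l ++ [c]).reverse := by
  cases l with
  | nil => simp [pvG, pvEvens]
  | cons a t =>
      unfold pvG
      simp only [List.cons_append, List.length_cons, List.length_append, List.length_nil,
        Nat.zero_add, List.reverse_append, List.reverse_cons, List.reverse_nil, List.nil_append]
      by_cases h : t.length % 2 = 0
      · rw [show (t.length + 1 + 1) % 2 = 0 from by omega,
            show (t.length + 1) % 2 = 1 from by omega]
        simp only [List.drop_zero, List.drop_succ_cons]
        rw [show c :: (t.reverse ++ [a]) = ((a :: t) ++ [c]).reverse from by simp,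
            show t.reverse ++ [a] = (a :: t).reverse from by simp,
            pvEvens_reverse ((a :: t) ++ [c]), pvEvens_reverse (a :: t)]
        rw [if_pos (by simp; omega), if_neg (by simp; omega)]
        simp only [List.cons_append, List.tail_cons]
        rw [pvEvens_append_singleton t c, if_pos h]
        rw [show a :: (t ++ [c]) = (a :: t) ++ [c] from rfl,
            pvEvens_append_singleton (a :: t) c, if_neg (by simp; omega)]
        simp
      · rw [show (t.length + 1 + 1) % 2 = 1 from by omega,
            show (t.length + 1) % 2 = 0 from by omega]
        simp only [List.drop_zero, List.drop_succ_cons]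
        rw [show c :: (t.reverse ++ [a]) = ((a :: t) ++ [c]).reverse from by simp,
            show t.reverse ++ [a] = (a :: t).reverse from by simp,
            pvEvens_reverse ((a :: t) ++ [c]), pvEvens_reverse (a :: t)]
        rw [if_neg (by simp; omega), if_pos (by simp; omega)]
        simp only [List.cons_append, List.tail_cons]
        rw [show a :: (t ++ [c]) = (a :: t) ++ [c] from rfl,
            pvEvens_append_singleton (a :: t) c, if_pos (by simp; omega)]
        rw [pvEvens_append_singleton t c, if_neg h]
        simp

-- B's first loop computes the even positions of the reversed prefix
lemma pvDesc_take (chars : List Char) :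
    ∀ k : Nat, k ≤ chars.length → pvDesc chars ((k : Int) - 1) = pvEvens (chars.take k).reverse := by
  intro k
  induction k using Nat.strong_induction_on with
  | _ k ih =>
      match k with
      | 0 => intro _; rw [pvDesc]; simp [pvEvens]
      | 1 =>
          intro hk
          have h0 : 0 < chars.length := hk
          rw [pvDesc, dif_pos (by norm_num), pvDesc, dif_neg (by norm_num)]
          simp [PySem.List.pyGet?, PySem.List.pyIdx?, List.take_add_one,
                List.getElem?_eq_getElem, h0, pvEvens]
      | (k+2) =>
          intro hk
          have hlt : k + 1 < chars.length := by omega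
          have hle : k ≤ chars.length := by omega
          rw [pvDesc, dif_pos (by push_cast; omega)]
          have hc : ((k + 2 : Nat) : Int) - 1 - 2 = ((k : Int)) - 1 := by push_cast; ring
          rw [hc, ih k (by omega) hle]
          have hg : (PySem.List.pyGet? chars (((k + 2 : Nat) : Int) - 1)).getD ' ' = chars[k+1] := by
            rw [show ((k + 2 : Nat) : Int) - 1 = ((k + 1 : Nat) : Int) from by push_cast; ring,
                PySem.List.pyGet?_natCast, List.getElem?_eq_getElem hlt]
            rfl
          rw [hg]
          have ht1 : chars.take (k + 2) = chars.take (k + 1) ++ [chars[k+1]] := by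
            rw [List.take_add_one, List.getElem?_eq_getElem hlt]; rfl
          have ht2 : chars.take (k + 1) = chars.take k ++ [chars[k]'(by omega)] := by
            rw [List.take_add_one, List.getElem?_eq_getElem (by omega : k < chars.length)]; rfl
          rw [ht1]
          simp only [List.reverse_append, List.reverse_cons, List.reverse_nil, List.nil_append,
            List.singleton_append]
          rw [ht2]
          simp only [List.reverse_append, List.reverse_cons, List.reverse_nil, List.nil_append,
            List.singleton_append]
          rw [pvEvens_cons]
          simp

-- B's second loop computes the even positions of the suffix
lemma pvAsc_drop (chars : List Char) :
    ∀ k : Nat, pvAsc chars (k : Int) = pvEvens (chars.drop k) := by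
  intro k
  induction hm : chars.length - k using Nat.strong_induction_on generalizing k with
  | _ m ih =>
      rw [pvAsc]
      by_cases h : (k : Int) < (chars.length : Int)
      · have hk : k < chars.length := by exact_mod_cast h
        rw [dif_pos h]
        have hg : (PySem.List.pyGet? chars (k : Int)).getD ' ' = chars[k] := by
          rw [PySem.List.pyGet?_natCast, List.getElem?_eq_getElem hk]; rfl
        rw [hg, show (k : Int) + 2 = ((k + 2 : Nat) : Int) from by push_cast; ring,
            ih (chars.length - (k + 2)) (by omega) (k + 2) rfl]
        rw [List.drop_eq_getElem_cons hk, pvEvens_cons, List.tail_drop]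
      · have hk : chars.length ≤ k := by exact_mod_cast not_lt.mp h
        rw [dif_neg h, List.drop_eq_nil_of_le hk]
        simp [pvEvens]

-- A's loop maintains the closed form of the processed prefix
lemma pvLoopA_inv (chars : List Char) :
    ∀ x : Nat, ∀ r : List Char, r = pvG (chars.take x) → pvLoopA chars x r = pvG chars := by
  intro x
  induction hm : chars.length - x using Nat.strong_induction_on generalizing x with
  | _ m ih =>
      intro r hr
      rw [pvLoopA]
      by_cases h : (x : Int) ≤ (chars.length : Int) - 1
      · have hxl : x < chars.length := by exact_mod_cast (by omega : (x : Int) < chars.length)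
        rw [dif_pos h]
        have hg : (PySem.List.pyGet? chars (x : Int)).getD ' ' = chars[x] := by
          rw [PySem.List.pyGet?_natCast, List.getElem?_eq_getElem hxl]; rfl
        refine ih (chars.length - (x + 1)) (by omega) (x + 1) rfl _ ?_
        rw [hr, hg, ← pvG_step]
        congr 1
        rw [List.take_add_one, List.getElem?_eq_getElem hxl]
        rfl
      · have hx : chars.length ≤ x := by omega
        rw [dif_neg h, hr, List.take_of_length_le hx]

-- ===== VERDICT (by name: the statement is the Claim_ definition above) =====
theorem pancake_scramble_spec : Claim_equal_pancake_scramble := by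
  intro text _
  unfold Spec_pancake_scramble pancake_scramble pancake_scramble_alt
  congr 1
  generalize text.toList = chars
  have hB : pvDesc chars ((chars.length : Int) - 1) ++
        pvAsc chars (PySem.Int.mod (chars.length : Int) 2) = pvG chars := by
    have h1 := pvDesc_take chars chars.length le_rfl
    rw [List.take_length] at h1
    have hm : PySem.Int.mod (chars.length : Int) 2 = ((chars.length % 2 : Nat) : Int) := by
      exact_mod_cast PySem.Int.mod_natCast chars.length 2
    rw [h1, hm, pvAsc_drop chars (chars.length % 2)]
    rfl
  rw [hB]
  have hbase : (PySem.List.slice chars (some 0) (some 2)).reverse = pvG (chars.take 2) := by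
    have hs : PySem.List.slice chars (some 0) (some 2) = chars.take 2 := by
      have := PySem.List.slice_natCast (xs := chars) (a := 0) (b := 2)
      simpa using this
    rw [hs]
    match chars with
    | [] => simp [pvG, pvEvens]
    | [a] => simp [pvG, pvEvens]
    | a :: b :: t => simp [pvG, pvEvens, List.take]
  exact pvLoopA_inv chars 2 _ hbase
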